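-- pv_equiv track=rewrite | github.com/thrkll/kvizz-bot | kvizz-bot.py | dot_combinations
-- ===== SOURCE A (Python) =====
-- number_of_rounds = 3600
--
-- def dot_combinations(email):
--     # Skilar lista af emails með punktum. T.d.
--     #   f.ree_burger_generator
--     #   f.r.ree_burger_generator
--     #   ...
--     # Bottinn getur spilað ca. 3600 leiki á dag. Til að email verði ekki endur-
--     # tekið þarf fyrri hluti emails að vera a.m.k. 13 stafir (2^12 = 4096)
--     # https://stackoverflow.com/a/50023811
--
--     temp, email_second = email.split('@')
--
--     count = 0
--     combinations = []
--     while count.bit_length() < len(temp):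
--         current_word = []
--         for index, letter in enumerate(temp):
--             current_word.append(letter)
--             if (1 << index) & count:
--                 current_word.append(".")
--
--         email_first = "".join(current_word)
--         email = email_first + '@' + email_second
--         combinations.append(email)
--         count += 1
--
--         # Óþarft að búa til fleiri samsetningar en fjöldi umferða sem á að spila
--         if count == number_of_rounds:
--             break
--
--     return combinations
-- ===== SOURCE B (Python) =====
-- number_of_rounds = 3600
--
-- def dot_combinations(email):
--     local, domain = email.split('@')
--     if not local:
--         return []
--     # Iterative list-doubling: fold over the letters after the first; at each
--     # letter the list of partial words doubles (letter appended without a dot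
--     # before it, then with one), truncated to the 3600-game cap.
--     words = [local[0]]
--     for ch in local[1:]:
--         words = ([w + ch for w in words] + [w + '.' + ch for w in words])[:number_of_rounds]
--     return [w + '@' + domain for w in words]
-- ===== Notes on version B (the rewrite author's own statement) =====
-- stated objective: alternative
-- what changed: B drops A's binary counter and per-letter bit tests entirely: it folds once over the letters of the local part, doubling the accumulated list of partial words at each letter (the letter appended without a dot before it, then with one) and truncating to the 3600 cap, so the whole list is grown by list-doubling instead of enumerated counter-by-counter.
import Mathlib
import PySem

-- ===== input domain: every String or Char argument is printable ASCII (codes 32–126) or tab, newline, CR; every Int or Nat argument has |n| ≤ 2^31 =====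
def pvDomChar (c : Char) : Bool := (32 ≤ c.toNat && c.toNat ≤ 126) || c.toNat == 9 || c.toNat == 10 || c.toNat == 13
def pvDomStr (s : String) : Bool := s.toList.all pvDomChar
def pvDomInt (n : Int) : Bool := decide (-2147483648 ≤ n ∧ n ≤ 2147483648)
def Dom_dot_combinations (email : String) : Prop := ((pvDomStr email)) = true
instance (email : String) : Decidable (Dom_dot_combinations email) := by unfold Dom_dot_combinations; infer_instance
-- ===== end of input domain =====

-- B replaces A's while loop over a binary counter with bit tests by a single fold
-- over the local part's letters that doubles the list of partial words at each
-- letter (letter without / with a preceding dot), truncated to 3600; objective: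
-- alternative decomposition, same results.

-- ===== PORT A =====
-- inner `for index, letter in enumerate(temp)` loop building one dotted word
def pvBuildWordA (temp : List Char) (count : Nat) : List Char :=
  temp.zipIdx.foldl
    (fun current_word p =>
      (current_word ++ [p.1]) ++ (if (1 <<< p.2) &&& count ≠ 0 then ['.'] else []))
    []

-- the `while count.bit_length() < len(temp)` loop; fuel 3600 suffices because the
-- loop breaks once count reaches number_of_rounds = 3600
def pvLoopA (temp : List Char) (second : List Char) : Nat → Nat → List String → List String
  | 0, _, combinations => combinations
  | fuel + 1, count, combinations =>
    if PySem.Int.bitLength (count : Int) < temp.length then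
      let word := pvBuildWordA temp count
      let combinations' := combinations ++ [String.ofList (word ++ '@' :: second)]
      if count + 1 = 3600 then combinations'
      else pvLoopA temp second fuel (count + 1) combinations'
    else combinations

def dot_combinations (email : String) : List String :=
  match PySem.Str.split? email "@" with
  | some [temp, second] => pvLoopA temp.toList second.toList 3600 0 []
  | _ => []   -- Python raises ValueError here (unpacking ≠ 2 pieces); excluded by Pre_

-- ===== PORT B =====
-- `words = ([w + ch for w in words] + [w + '.' + ch for w in words])[:3600]`
def pvStepB (words : List (List Char)) (ch : Char) : List (List Char) :=
  ((words.map (· ++ [ch])) ++ (words.map (· ++ ['.', ch]))).take 3600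

def dot_combinations_alt (email : String) : List String :=
  let parts := (PySem.Str.split? email "@").getD []
  if parts.length = 2 then   -- `local, domain = ...` unpacking raises ValueError otherwise; excluded by Pre_
    let loc := (parts.getD 0 "").toList
    let dom := (parts.getD 1 "").toList
    if loc.isEmpty then []
    else (loc.tail.foldl pvStepB [[loc.headD ' ']]).map
      (fun w => String.ofList (w ++ '@' :: dom))
  else []

-- ===== PRECONDITION & SPEC =====
-- Pre_ excludes the inputs on which the tuple unpacking of the split raises
-- ValueError in Python (the separator occurring zero or several times): Pre_ holds
-- exactly when the split yields two pieces.
def Pre_dot_combinations (email : String) : Prop :=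
  ((PySem.Str.split? email "@").getD []).length = 2
instance (email : String) : Decidable (Pre_dot_combinations email) := by
  unfold Pre_dot_combinations; infer_instance
def pvWitness_dot_combinations : String := "abc@x.com"

def Spec_dot_combinations (email : String) (out : List String) : Prop := out = dot_combinations_alt email
instance (email : String) (out : List String) : Decidable (Spec_dot_combinations email out) := by unfold Spec_dot_combinations; infer_instance

-- ===== CLAIM (what is proved, stated in full; the proofs are below) =====
def Claim_equal_dot_combinations : Prop := ∀ (email : String), Dom_dot_combinations email → Pre_dot_combinations email → Spec_dot_combinations email (dot_combinations email)

-- ===== LEMMAS AND PROOFS =====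

theorem pvBitLen_lt_iff (c n : Nat) (hn : 1 ≤ n) :
    PySem.Int.bitLength (c : Int) < n ↔ c < 2 ^ (n - 1) := by
  constructor
  · intro h
    have h1 := PySem.Int.lt_two_pow_bitLength (c : Int)
    simp at h1
    calc c < 2 ^ PySem.Int.bitLength (c : Int) := h1
      _ ≤ 2 ^ (n - 1) := Nat.pow_le_pow_right (by norm_num) (by omega)
  · intro h
    rcases Nat.eq_zero_or_pos c with hc | hc
    · subst hc; simpa [PySem.Int.bitLength_zero] using hn
    · have hne : (c : Int) ≠ 0 := by exact_mod_cast hc.ne'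
      have h2 := PySem.Int.two_pow_bitLength_le (c : Int) hne
      simp at h2
      by_contra hlt
      push_neg at hlt
      have : 2 ^ (n - 1) ≤ 2 ^ (PySem.Int.bitLength (c : Int) - 1) :=
        Nat.pow_le_pow_right (by norm_num) (by
          have hbl : 1 ≤ PySem.Int.bitLength (c : Int) := by
            by_contra hb
            push_neg at hb
            interval_cases hbl : PySem.Int.bitLength (c : Int)
            · have := PySem.Int.lt_two_pow_bitLength (c : Int)
              simp [hbl] at this
              omega
          omega)
      omega

theorem pvShift_and_ne (i c : Nat) : ((1 <<< i) &&& c ≠ 0) ↔ c.testBit i = true := by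
  rw [Nat.one_shiftLeft, Nat.and_comm, Nat.and_two_pow]
  rcases h : c.testBit i <;> simp

-- A's word builder only looks at bits 0..len-1 of the counter
theorem pvBuild_congr (p : List Char) (c c' : Nat)
    (h : ∀ i < p.length, c.testBit i = c'.testBit i) :
    pvBuildWordA p c = pvBuildWordA p c' := by
  unfold pvBuildWordA
  apply PySem.List.foldl_congr_mem
  rintro acc ⟨x, i⟩ hp
  obtain ⟨-, hi, -⟩ := List.mem_zipIdx hp
  simp only [Nat.zero_add] at hi
  have hiff : ((1 <<< (x, i).2) &&& c ≠ 0) ↔ ((1 <<< (x, i).2) &&& c' ≠ 0) := by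
    simp only [pvShift_and_ne]
    rw [h i hi]
  simp only [hiff]

theorem pvBuild_snoc (p : List Char) (a : Char) (c : Nat) :
    pvBuildWordA (p ++ [a]) c =
      (pvBuildWordA p c ++ [a]) ++ (if (1 <<< p.length) &&& c ≠ 0 then ['.'] else []) := by
  unfold pvBuildWordA
  rw [List.zipIdx_append, List.foldl_append]
  simp [List.zipIdx]

-- key step: the doubled, truncated word list for prefix p ++ [a]
theorem pvStep_range (p : List Char) (a : Char) (hp : p ≠ []) :
    pvStepB (((List.range (2 ^ (p.length - 1))).map (pvBuildWordA p)).take 3600) a =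
      ((List.range (2 ^ ((p ++ [a]).length - 1))).map (pvBuildWordA (p ++ [a]))).take 3600 := by
  have hplen : 1 ≤ p.length := List.length_pos_iff.mpr hp
  set j := p.length with hj
  have hlen : (p ++ [a]).length - 1 = j := by simp [hj]
  rw [hlen]
  have h2j : 2 ^ j = 2 ^ (j - 1) + 2 ^ (j - 1) := by
    conv_lhs => rw [show j = (j - 1) + 1 by omega]
    rw [pow_succ]; ring
  have hsplit : List.range (2 ^ j) = List.range (2 ^ (j - 1)) ++
      (List.range (2 ^ (j - 1))).map (fun c => 2 ^ (j - 1) + c) := by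
    rw [h2j, List.range_add]
  -- words for the low half: no dot before a; high half: dot before a
  have hlow : ∀ c < 2 ^ (j - 1),
      pvBuildWordA (p ++ [a]) c = pvBuildWordA p c ++ [a] := by
    intro c hc
    rw [pvBuild_snoc]
    have hbit : c.testBit j = false :=
      Nat.testBit_lt_two_pow (lt_of_lt_of_le hc (Nat.pow_le_pow_right (by norm_num) (by omega)))
    rw [if_neg (fun hx => by have := (pvShift_and_ne j c).mp hx; rw [hbit] at this; exact absurd this (by simp))]
    simp
  have hhigh : ∀ c < 2 ^ (j - 1),
      pvBuildWordA (p ++ [a]) (2 ^ (j - 1) + c) = pvBuildWordA p c ++ ['.', a] := by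
    intro c hc
    set c' := 2 ^ (j - 1) + c with hc'
    have hcj : c' < 2 ^ j := by omega
    rw [pvBuild_snoc]
    have hbitj : c'.testBit j = false := Nat.testBit_lt_two_pow hcj
    rw [if_neg (fun hx => by have := (pvShift_and_ne j c').mp hx; rw [hbitj] at this; exact absurd this (by simp))]
    -- pvBuildWordA p c' : bits 0..j-2 equal c's, bit j-1 = 1
    obtain ⟨q, b, rfl⟩ : ∃ q b, p = q ++ [b] :=
      ⟨p.dropLast, p.getLast hp, (List.dropLast_append_getLast hp).symm⟩
    have hql : q.length = j - 1 := by
      have hq : j = q.length + 1 := by rw [hj]; simp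
      omega
    have hcongr : pvBuildWordA q c' = pvBuildWordA q c := by
      apply pvBuild_congr
      intro i hi
      rw [hql] at hi
      rw [hc', Nat.testBit_two_pow_add_gt hi]
    have hbq1 : c'.testBit (j - 1) = true := by
      rw [hc', Nat.testBit_two_pow_add_eq, Nat.testBit_lt_two_pow hc]; rfl
    have hbq0 : c.testBit (j - 1) = false := Nat.testBit_lt_two_pow hc
    rw [pvBuild_snoc, pvBuild_snoc, hql, hcongr]
    rw [if_pos ((pvShift_and_ne (j-1) c').mpr hbq1),
        if_neg (fun hx => by have := (pvShift_and_ne (j-1) c).mp hx; rw [hbq0] at this; exact absurd this (by simp))]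
    simp
  -- take-3600 commutes with the doubling
  unfold pvStepB
  rw [← List.map_take, ← List.map_take, List.map_map, List.map_map]
  have hmap1 : ((List.range (2 ^ (j - 1))).map ((· ++ [a]) ∘ pvBuildWordA p)) =
      (List.range (2 ^ (j - 1))).map (pvBuildWordA (p ++ [a])) := by
    apply List.map_congr_left; intro c hc
    exact (hlow c (List.mem_range.mp hc)).symm
  have hmap2 : ((List.range (2 ^ (j - 1))).map ((· ++ ['.', a]) ∘ pvBuildWordA p)) =
      ((List.range (2 ^ (j - 1))).map (fun c => 2 ^ (j - 1) + c)).map (pvBuildWordA (p ++ [a])) := by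
    rw [List.map_map]
    apply List.map_congr_left; intro c hc
    exact (hhigh c (List.mem_range.mp hc)).symm
  -- take-append identity: truncating both halves before concatenating is harmless
  have hgen : ∀ (X Y : List (List Char)),
      (X.take 3600 ++ Y.take 3600).take 3600 = (X ++ Y).take 3600 := by
    intro X Y
    rw [List.take_append, List.take_append, List.take_take, List.take_take, List.length_take]
    congr 1
    all_goals congr 1
    all_goals omega
  rw [List.map_take, List.map_take, hgen, hmap1, hmap2, ← List.map_append, ← hsplit,
      List.map_take]

-- the fold invariant over the remaining letters
theorem pvFold_inv (rest : List Char) : ∀ (p : List Char), p ≠ [] →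
    rest.foldl pvStepB (((List.range (2 ^ (p.length - 1))).map (pvBuildWordA p)).take 3600) =
      ((List.range (2 ^ ((p ++ rest).length - 1))).map (pvBuildWordA (p ++ rest))).take 3600 := by
  induction rest with
  | nil => intro p hp; simp
  | cons a rest ih =>
    intro p hp
    rw [List.foldl_cons, pvStep_range p a hp, ih (p ++ [a]) (by simp)]
    simp

theorem pvLoopA_eq (temp second : List Char) (hn : 1 ≤ temp.length)
    (bound : Nat) (hb : bound = min (2 ^ (temp.length - 1)) 3600) :
    ∀ fuel count acc, count < bound →
      (bound - count < fuel ∨ (bound = 3600 ∧ bound - count ≤ fuel)) →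
      pvLoopA temp second fuel count acc =
        acc ++ (List.range' count (bound - count)).map
          (fun c => String.ofList (pvBuildWordA temp c ++ '@' :: second)) := by
  intro fuel
  induction fuel with
  | zero => intro count acc hcnt hf; omega
  | succ fuel ih =>
    intro count acc hcnt hf
    have hcond : PySem.Int.bitLength (count : Int) < temp.length := by
      rw [pvBitLen_lt_iff count temp.length hn]; omega
    rw [pvLoopA, if_pos hcond]
    simp only []
    have hrange : List.range' count (bound - count) =
        count :: List.range' (count + 1) (bound - count - 1) := by
      have : bound - count = (bound - count - 1) + 1 := by omega
      rw [this, List.range'_succ]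
      congr 1
    by_cases h36 : count + 1 = 3600
    · rw [if_pos h36]
      have : bound - count = 1 := by omega
      rw [this]
      simp [List.range'_succ]
    · rw [if_neg h36]
      by_cases hlt : count + 1 < bound
      · rw [ih (count + 1) _ hlt (by omega)]
        rw [hrange]
        simp [Nat.sub_sub]
      · have hstop : ¬ PySem.Int.bitLength ((count + 1 : Nat) : Int) < temp.length := by
          rw [pvBitLen_lt_iff (count + 1) temp.length hn]; omega
        obtain ⟨fuel', rfl⟩ : ∃ f', fuel = f' + 1 := ⟨fuel - 1, by omega⟩
        rw [pvLoopA, if_neg hstop]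
        rw [hrange]
        have : bound - count - 1 = 0 := by omega
        rw [this]
        simp

-- ===== VERDICT (by name: the statement is the Claim_ definition above) =====
theorem dot_combinations_spec : Claim_equal_dot_combinations := by
  intro email _ hpre
  unfold Pre_dot_combinations at hpre
  unfold Spec_dot_combinations dot_combinations dot_combinations_alt
  rcases h : PySem.Str.split? email "@" with _ | parts
  · rw [h] at hpre; simp at hpre
  · rcases parts with _ | ⟨t, _ | ⟨s, _ | ⟨u, rest⟩⟩⟩
    · rw [h] at hpre; simp at hpre
    · rw [h] at hpre; simp at hpre
    case cons.cons.cons => rw [h] at hpre; simp at hpre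
    -- main case: exactly two pieces [t, s]
    simp only [Option.getD_some, List.length_cons, List.length_nil, List.getD_cons_zero,
      List.getD_cons_succ, if_pos rfl]
    rcases ht : t.toList with _ | ⟨c0, restl⟩
    · show pvLoopA [] s.toList (3599 + 1) 0 [] =
        if ([] : List Char).isEmpty then []
        else (([] : List Char).tail.foldl pvStepB [[([] : List Char).headD ' ']]).map
          (fun w => String.ofList (w ++ '@' :: s.toList))
      rw [pvLoopA]
      simp [PySem.Int.bitLength_zero]
    · show pvLoopA (c0 :: restl) s.toList 3600 0 [] =
        (restl.foldl pvStepB [[c0]]).map (fun w => String.ofList (w ++ '@' :: s.toList))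
      have hstart : ([[c0]] : List (List Char)) =
          ((List.range (2 ^ (([c0] : List Char).length - 1))).map (pvBuildWordA [c0])).take 3600 := by
        simp [pvBuildWordA, List.zipIdx]
      rw [hstart, pvFold_inv restl [c0] (by simp)]
      have hn : 1 ≤ (c0 :: restl).length := by simp
      set n := (c0 :: restl).length with hnn
      have hln : (([c0] ++ restl : List Char)) = c0 :: restl := by simp
      rw [hln]
      set bound := min (2 ^ (n - 1)) 3600 with hbdef
      have hbpos : 0 < bound := by
        have : 0 < 2 ^ (n - 1) := Nat.two_pow_pos _
        omega
      rw [pvLoopA_eq (c0 :: restl) s.toList hn bound hbdef 3600 0 [] hbpos (by omega)]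
      rw [List.nil_append, Nat.sub_zero, ← List.map_take, List.take_range, List.map_map]
      rw [List.range_eq_range'.symm, Nat.min_comm, ← hbdef]
      rfl
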